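-- pv_equiv track=rewrite | github.com/guswo7470/kimhyunjae | substitution_cipher_alphabetfrequency_decrypt/alphabet-freq.py | Freq2Key
-- ===== SOURCE A (Python) =====
-- ETAOIN = 'ETAOINSHRDLCUMWFGYPBVKJXQZ' #빈도분석 (영문특성)
--
-- def getItemZero(items):
--     return items[0]
--
-- def Freq2Key(freq_order):
--     temp_dict = {}
--     i = 0
--     for ch in freq_order:
--         temp_dict[ETAOIN[i]] = ch   # temp_dict = {'E': 'B', 'T': 'N', ...}
--         i += 1
--     temp_list = list(temp_dict.items())     # temp_list = [ ('E','B'), ('T','N'), ...]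
--     temp_list.sort(key=getItemZero, reverse=False) # temp_list [('A':'X'), ...]
--     temp_key_list = []
--     for item in temp_list:
--         temp_key_list.append(item[1]) # temp_key_list = [ 'X', 'C, ...]
--
--     return ''.join(temp_key_list)
-- ===== SOURCE B (Python) =====
-- ETAOIN = 'ETAOINSHRDLCUMWFGYPBVKJXQZ'
--
-- def Freq2Key(freq_order):
--     out = []
--     for letter in 'ABCDEFGHIJKLMNOPQRSTUVWXYZ':
--         j = ETAOIN.index(letter)
--         if j < len(freq_order):
--             out.append(freq_order[j])
--     return ''.join(out)
-- ===== Notes on version B (the rewrite author's own statement) =====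
-- stated objective: alternative
-- what changed: B discards A's dict construction and comparison sort of (key,value) pairs: it scans the 26 alphabet letters in increasing order and for each letter emits the freq_order character at that letter's position in ETAOIN when the position is in range, producing the alphabetically ordered key directly with no dict and no sort.
import Mathlib
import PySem

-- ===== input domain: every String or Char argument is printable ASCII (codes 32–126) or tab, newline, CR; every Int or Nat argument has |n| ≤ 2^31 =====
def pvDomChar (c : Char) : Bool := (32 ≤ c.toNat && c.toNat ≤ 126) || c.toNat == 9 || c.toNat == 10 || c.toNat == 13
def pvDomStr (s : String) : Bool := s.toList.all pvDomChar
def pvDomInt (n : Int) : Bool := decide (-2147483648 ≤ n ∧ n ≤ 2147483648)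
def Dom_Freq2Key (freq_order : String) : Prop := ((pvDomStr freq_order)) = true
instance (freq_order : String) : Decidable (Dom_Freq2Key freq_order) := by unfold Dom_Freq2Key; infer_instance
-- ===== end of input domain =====

-- B replaces A's dict build + comparison sort of (key, value) pairs by a direct scan of the
-- alphabet 'A'..'Z' emitting freq_order[ETAOIN.index(letter)] when in range; objective: alternative.

-- ===== PORT A =====
def pvEtaoin : List Char := "ETAOINSHRDLCUMWFGYPBVKJXQZ".toList

-- the 'for ch in freq_order' loop: temp_dict[ETAOIN[i]] = ch; i += 1  (none = IndexError when i ≥ 26)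
def pvLoopA : List Char → PySem.Dict Char Char → Int → Option (PySem.Dict Char Char)
  | [], d, _ => some d
  | ch :: rest, d, i =>
    match PySem.List.pyGet? pvEtaoin i with
    | none => none
    | some k => pvLoopA rest (d.insert k ch) (i + 1)

def Freq2Key (freq_order : String) : String :=
  match pvLoopA freq_order.toList PySem.Dict.empty 0 with
  | none => ""  -- IndexError: excluded by Pre_Freq2Key
  | some d =>
    String.ofList (((PySem.List.sorted d.items (fun item => item.1) false)).map (fun item => item.2))

-- ===== PORT B =====
def pvAlpha : List Char := "ABCDEFGHIJKLMNOPQRSTUVWXYZ".toList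

-- the "for letter in 'A'..'Z'" loop: j = ETAOIN.index(letter); if j < len: out.append(freq_order[j])
def Freq2Key_alt (freq_order : String) : String :=
  String.ofList (pvAlpha.foldl (fun out letter =>
    match PySem.List.index? pvEtaoin letter with
    | none => out  -- unreachable: every uppercase letter occurs in ETAOIN
    | some j =>
      if j < freq_order.toList.length then
        match PySem.List.pyGet? freq_order.toList (j : Int) with
        | none => out  -- unreachable: j < length
        | some c => out ++ [c]
      else out) [])

-- ===== PRECONDITION & SPEC =====
-- Pre_ excludes freq_order longer than 26, on which A raises IndexError at ETAOIN[i].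
def Pre_Freq2Key (freq_order : String) : Prop := freq_order.toList.length ≤ 26
instance (freq_order : String) : Decidable (Pre_Freq2Key freq_order) := by unfold Pre_Freq2Key; infer_instance
def pvWitness_Freq2Key : String := "XPBW"

def Spec_Freq2Key (freq_order : String) (out : String) : Prop := out = Freq2Key_alt freq_order
instance (freq_order : String) (out : String) : Decidable (Spec_Freq2Key freq_order out) := by unfold Spec_Freq2Key; infer_instance

-- ===== CLAIM (what is proved, stated in full; the proofs are below) =====
def Claim_equal_Freq2Key : Prop := ∀ (freq_order : String), Dom_Freq2Key freq_order → Pre_Freq2Key freq_order → Spec_Freq2Key freq_order (Freq2Key freq_order)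
-- ===== LEMMAS AND PROOFS =====

-- ETAOIN[j] as a total function
def pvKey (j : Nat) : Char := pvEtaoin.getD j ' '
-- the (key, value) pairs A's loop inserts, starting at counter m
def pvSpecItems : Nat → List Char → List (Char × Char)
  | _, [] => []
  | m, c :: cs => (pvKey m, c) :: pvSpecItems (m + 1) cs

-- what B emits for one letter
def pvPick (cs : List Char) (l : Char) : Option (Char × Char) :=
  match PySem.List.index? pvEtaoin l with
  | none => none
  | some j => if j < cs.length then some (l, cs.getD j ' ') else none

theorem pvPyGetE (m : Nat) (h : m < 26) :
    PySem.List.pyGet? pvEtaoin (m : Int) = some (pvKey m) := by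
  revert h; revert m
  decide

theorem pvKeyInj : ∀ i < 26, ∀ j < 26, i ≠ j → pvKey i ≠ pvKey j := by decide

theorem pvKeyMemAlpha : ∀ j < 26, pvKey j ∈ pvAlpha := by decide

theorem pvIdxKey : ∀ j < 26, PySem.List.index? pvEtaoin (pvKey j) = some j := by decide

theorem pvAlphaLen : pvAlpha.length = 26 := by decide

theorem pvAlphaLt : ∀ a < 26, ∀ b < 26, a < b → pvAlpha.getD a ' ' < pvAlpha.getD b ' ' := by decide

theorem pvAlphaKey : ∀ a < 26, ∃ j, j < 26 ∧ pvKey j = pvAlpha.getD a ' ' := by decide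

theorem pvAlphaSorted : pvAlpha.Pairwise (fun a b : Char => a < b) := by
  rw [List.pairwise_iff_getElem]
  intro i j hi hj hij
  have h := pvAlphaLt i (by have := pvAlphaLen; omega) j (by have := pvAlphaLen; omega) hij
  rwa [List.getD_eq_getElem _ _ hi, List.getD_eq_getElem _ _ hj] at h

theorem pvLoopA_eq (cs : List Char) : ∀ (m : Nat) (d : PySem.Dict Char Char),
    m + cs.length ≤ 26 →
    pvLoopA cs d (m : Int) =
      some ((pvSpecItems m cs).foldl (fun d p => d.insert p.1 p.2) d) := by
  induction cs with
  | nil => intro m d _; rfl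
  | cons c cs ih =>
    intro m d h
    have hc : (m : Int) + 1 = ((m + 1 : Nat) : Int) := by push_cast; ring
    simp only [pvLoopA, pvPyGetE m (by simp at h; omega), hc]
    rw [ih (m + 1) (d.insert (pvKey m) c) (by simp at h ⊢; omega)]
    rfl

theorem pvMemSpecItemsFst (cs : List Char) : ∀ (m : Nat) (x : Char),
    x ∈ (pvSpecItems m cs).map Prod.fst → ∃ j, m ≤ j ∧ j < m + cs.length ∧ x = pvKey j := by
  induction cs with
  | nil => intro m x hx; simp [pvSpecItems] at hx
  | cons c cs ih =>
    intro m x hx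
    simp only [pvSpecItems, List.map_cons, List.mem_cons] at hx
    rcases hx with h | h
    · exact ⟨m, le_refl m, by simp, h⟩
    · obtain ⟨j, h1, h2, h3⟩ := ih (m + 1) x h
      exact ⟨j, by omega, by simp; omega, h3⟩

theorem pvSpecItemsKeysNodup (cs : List Char) : ∀ (m : Nat),
    m + cs.length ≤ 26 → ((pvSpecItems m cs).map Prod.fst).Nodup := by
  induction cs with
  | nil => intro m _; simp [pvSpecItems]
  | cons c cs ih =>
    intro m h
    simp only [pvSpecItems, List.map_cons, List.nodup_cons]
    constructor
    · intro hmem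
      obtain ⟨j, h1, h2, h3⟩ := pvMemSpecItemsFst cs (m + 1) _ hmem
      simp at h
      exact pvKeyInj m (by omega) j (by omega) (by omega) h3
    · exact ih (m + 1) (by simp at h ⊢; omega)

-- membership characterisation of A's item list
theorem pvMemSpecItems (cs : List Char) : ∀ (m : Nat) (p : Char × Char),
    p ∈ pvSpecItems m cs ↔ ∃ k, k < cs.length ∧ p = (pvKey (m + k), cs.getD k ' ') := by
  induction cs with
  | nil => intro m p; simp [pvSpecItems]
  | cons c cs ih =>
    intro m p
    simp only [pvSpecItems, List.mem_cons, ih (m + 1)]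
    constructor
    · rintro (h | ⟨k, hk, hp⟩)
      · exact ⟨0, by simp, by simpa using h⟩
      · exact ⟨k + 1, by simp; omega, by simpa [Nat.add_assoc, Nat.add_comm 1 k] using hp⟩
    · rintro ⟨k, hk, hp⟩
      cases k with
      | zero => left; simpa using hp
      | succ k =>
        right
        exact ⟨k, by simp at hk; omega, by simpa [Nat.add_assoc, Nat.add_comm 1 k] using hp⟩

-- B's fold emits the snd-projection of the picked pairs
theorem pvFoldB (cs : List Char) (letters : List Char) : ∀ (out : List Char),
    letters.foldl (fun out letter =>
      match PySem.List.index? pvEtaoin letter with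
      | none => out
      | some j =>
        if j < cs.length then
          match PySem.List.pyGet? cs (j : Int) with
          | none => out
          | some c => out ++ [c]
        else out) out = out ++ (letters.filterMap (pvPick cs)).map Prod.snd := by
  induction letters with
  | nil => intro out; simp
  | cons l ls ih =>
    intro out
    simp only [List.foldl_cons, List.filterMap_cons]
    rcases hidx : PySem.List.index? pvEtaoin l with _ | j
    · have hpick : pvPick cs l = none := by unfold pvPick; rw [hidx]
      simp only [hidx, hpick]
      exact ih out
    · by_cases hj : j < cs.length
      · have hget : PySem.List.pyGet? cs (j : Int) = some (cs.getD j ' ') := by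
          rw [PySem.List.pyGet?_natCast, List.getElem?_eq_getElem hj, List.getD_eq_getElem cs ' ' hj]
        have hpick : pvPick cs l = some (l, cs.getD j ' ') := by
          unfold pvPick; rw [hidx]; simp only [hj, if_true]
        simp only [hidx, hj, if_true, hget, hpick, List.map_cons]
        rw [ih (out ++ [cs.getD j ' '])]
        simp
      · have hpick : pvPick cs l = none := by
          unfold pvPick; rw [hidx]; simp only [hj, if_false]
        simp only [hidx, hj, if_false, hpick]
        exact ih out

theorem pvPickFst (cs : List Char) (l : Char) (p : Char × Char)
    (h : pvPick cs l = some p) : p.1 = l := by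
  unfold pvPick at h
  rcases hidx : PySem.List.index? pvEtaoin l with _ | j <;> rw [hidx] at h
  · exact absurd h (by simp)
  · by_cases hj : j < cs.length
    · simp [hj] at h; rw [← h]
    · simp [hj] at h

theorem pvPickedPairwise (cs : List Char) (letters : List Char)
    (h : letters.Pairwise (fun a b : Char => a < b)) :
    (letters.filterMap (pvPick cs)).Pairwise (fun p q : Char × Char => p.1 < q.1) := by
  rw [List.pairwise_filterMap]
  refine h.imp ?_
  intro a b hab p hp q hq
  rw [pvPickFst cs a p hp, pvPickFst cs b q hq]
  exact hab

-- the permutation: B's picked pairs are exactly A's inserted items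
theorem pvPickedPerm (cs : List Char) (h : cs.length ≤ 26) :
    (pvSpecItems 0 cs).Perm (pvAlpha.filterMap (pvPick cs)) := by
  have hnd1 : (pvSpecItems 0 cs).Nodup :=
    (pvSpecItemsKeysNodup cs 0 (by omega)).of_map
  have hpw := pvPickedPairwise cs pvAlpha pvAlphaSorted
  have hnd2 : (pvAlpha.filterMap (pvPick cs)).Nodup :=
    hpw.imp (fun hlt => by intro he; rw [he] at hlt; exact lt_irrefl _ hlt)
  rw [List.perm_ext_iff_of_nodup hnd1 hnd2]
  intro p
  rw [pvMemSpecItems cs 0 p, List.mem_filterMap]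
  constructor
  · rintro ⟨k, hk, hp⟩
    refine ⟨pvKey k, pvKeyMemAlpha k (by omega), ?_⟩
    unfold pvPick
    rw [pvIdxKey k (by omega)]
    simp [hk, hp]
  · rintro ⟨l, hl, hp⟩
    obtain ⟨a, ha, hla⟩ := List.mem_iff_getElem.mp hl
    have ha26 : a < 26 := by have := pvAlphaLen; omega
    obtain ⟨j, hj26, hkey⟩ := pvAlphaKey a ha26
    have hl' : l = pvKey j := by rw [hkey, List.getD_eq_getElem _ _ ha, hla]
    subst hl'
    unfold pvPick at hp
    rw [pvIdxKey j hj26] at hp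
    by_cases hj : j < cs.length
    · simp only [hj, if_true, Option.some.injEq] at hp
      exact ⟨j, hj, by rw [← hp, Nat.zero_add]⟩
    · simp [hj] at hp

theorem pvCore (cs : List Char) (h : cs.length ≤ 26) :
    PySem.List.sorted ((pvSpecItems 0 cs).foldl (fun d p => d.insert p.1 p.2)
        (PySem.Dict.empty : PySem.Dict Char Char)).items (fun item => item.1) false
      = pvAlpha.filterMap (pvPick cs) := by
  have hitems : ((pvSpecItems 0 cs).foldl (fun d p => d.insert p.1 p.2)
      (PySem.Dict.empty : PySem.Dict Char Char)).items = pvSpecItems 0 cs := by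
    have := PySem.Dict.items_foldl_insert_fresh (l := pvSpecItems 0 cs)
      (k := Prod.fst) (v := Prod.snd) (d := PySem.Dict.empty)
      (by intro a _; simp [PySem.Dict.contains_empty])
      (pvSpecItemsKeysNodup cs 0 (by omega))
    simpa using this
  rw [hitems]
  exact PySem.List.sorted_eq_of_perm_of_pairwise_lt _ _ _
    (pvPickedPerm cs h).symm (pvPickedPairwise cs pvAlpha pvAlphaSorted)

-- ===== VERDICT (by name: the statement is the Claim_ definition above) =====
theorem Freq2Key_spec : Claim_equal_Freq2Key := by
  intro s _ hpre
  unfold Spec_Freq2Key Freq2Key Freq2Key_alt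
  have hpre' : s.toList.length ≤ 26 := hpre
  have hA := pvLoopA_eq s.toList 0 PySem.Dict.empty (by omega)
  simp only [Nat.cast_zero] at hA
  simp only [hA]
  rw [pvCore s.toList hpre', pvFoldB s.toList pvAlpha []]
  simp
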